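-- pv_equiv track=rewrite | github.com/OscarNaretto/MyFirstPy | main.py | sliding_window_view
-- ===== SOURCE A (Python) =====
-- def sliding_window_view(matrix, window_shape):
--     height, width = len(matrix), len(matrix[0])
--     window_h, window_w = window_shape
--
--     for y in range(height - window_h + 1):
--         yield [
--             [row[x:x + window_w] for row in matrix[y:y + window_h]]
--             for x in range(width - window_w + 1)
--         ]
-- ===== SOURCE B (Python) =====
-- def sliding_window_view(matrix, window_shape):
--     window_h, window_w = window_shape
--     n_x = len(matrix[0]) - window_w + 1
--     n_y = len(matrix) - window_h + 1
--     if n_y <= 0: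
--         return
--     # table of all horizontal strips: strips[r][x] == matrix[r][x:x+window_w]
--     strips = [[row[x:x + window_w] for x in range(n_x)] for row in matrix]
--     for y in range(n_y):
--         block = strips[y:y + window_h]
--         yield [[striprow[x] for striprow in block] for x in range(n_x)]
-- ===== Notes on version B (the rewrite author's own statement) =====
-- stated objective: alternative
-- what changed: B precomputes a table strips[r][x] = matrix[r][x:x+window_w] of all horizontal strips once (after an early exit when there are no window rows), then builds each yielded window by slicing the table (strips[y:y+window_h]) and indexing striprow[x], instead of re-slicing matrix rows for every window.
import Mathlib
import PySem

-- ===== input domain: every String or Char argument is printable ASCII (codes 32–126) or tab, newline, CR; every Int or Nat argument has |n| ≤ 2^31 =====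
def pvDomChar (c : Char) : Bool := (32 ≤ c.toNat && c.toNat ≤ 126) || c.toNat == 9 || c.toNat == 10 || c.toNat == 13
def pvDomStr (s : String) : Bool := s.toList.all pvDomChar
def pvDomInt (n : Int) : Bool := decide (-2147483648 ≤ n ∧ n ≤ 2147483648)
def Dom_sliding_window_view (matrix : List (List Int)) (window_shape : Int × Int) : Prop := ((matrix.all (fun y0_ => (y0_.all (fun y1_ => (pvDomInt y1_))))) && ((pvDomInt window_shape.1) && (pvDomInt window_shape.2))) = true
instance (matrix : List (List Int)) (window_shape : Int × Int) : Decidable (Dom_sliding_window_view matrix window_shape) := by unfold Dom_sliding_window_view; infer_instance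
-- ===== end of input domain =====

-- B precomputes a table of all horizontal strips once and assembles every window by
-- slicing/indexing that table, instead of re-slicing matrix rows for each window
-- (alternative decomposition, same cost).

-- ===== PORT A =====
-- matrix[0] raises IndexError on matrix = []; Pre_ excludes that, headD is the port's total stand-in.
def sliding_window_view (matrix : List (List Int)) (window_shape : Int × Int) : List (List (List (List Int))) :=
  let height : Int := matrix.length
  let width : Int := (matrix.headD []).length
  let window_h : Int := window_shape.1
  let window_w : Int := window_shape.2
  (PySem.List.pyRange 0 (height - window_h + 1) 1).map (fun y =>
    (PySem.List.pyRange 0 (width - window_w + 1) 1).map (fun x =>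
      (PySem.List.slice matrix (some y) (some (y + window_h))).map (fun row =>
        PySem.List.slice row (some x) (some (x + window_w)))))

-- ===== PORT B =====
-- matrix[0] raises IndexError on matrix = []; Pre_ excludes that, headD is the port's total stand-in.
def sliding_window_view_alt (matrix : List (List Int)) (window_shape : Int × Int) : List (List (List (List Int))) :=
  let window_h : Int := window_shape.1
  let window_w : Int := window_shape.2
  let n_x : Int := ((matrix.headD []).length : Int) - window_w + 1
  let n_y : Int := (matrix.length : Int) - window_h + 1
  if n_y ≤ 0 then [] else
    let strips : List (List (List Int)) :=
      matrix.map (fun row =>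
        (PySem.List.pyRange 0 n_x 1).map (fun x =>
          PySem.List.slice row (some x) (some (x + window_w))))
    (PySem.List.pyRange 0 n_y 1).map (fun y =>
      let block : List (List (List Int)) := PySem.List.slice strips (some y) (some (y + window_h))
      (PySem.List.pyRange 0 n_x 1).map (fun x =>
        block.map (fun striprow => PySem.List.pyGetD striprow x [])))

-- ===== PRECONDITION & SPEC =====
-- Pre_ excludes exactly the empty matrix, on which both Pythons raise IndexError at len(matrix[0]).
def Pre_sliding_window_view (matrix : List (List Int)) (window_shape : Int × Int) : Prop :=
  matrix ≠ []
instance (matrix : List (List Int)) (window_shape : Int × Int) : Decidable (Pre_sliding_window_view matrix window_shape) := by unfold Pre_sliding_window_view; infer_instance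
def pvWitness_sliding_window_view : List (List Int) × (Int × Int) := ([[1, 2], [3, 4]], (1, 1))

def Spec_sliding_window_view (matrix : List (List Int)) (window_shape : Int × Int) (out : List (List (List (List Int)))) : Prop := out = sliding_window_view_alt matrix window_shape
instance (matrix : List (List Int)) (window_shape : Int × Int) (out : List (List (List (List Int)))) : Decidable (Spec_sliding_window_view matrix window_shape out) := by unfold Spec_sliding_window_view; infer_instance

-- ===== CLAIM (what is proved, stated in full; the proofs are below) =====
def Claim_equal_sliding_window_view : Prop := ∀ (matrix : List (List Int)) (window_shape : Int × Int), Dom_sliding_window_view matrix window_shape → Pre_sliding_window_view matrix window_shape → Spec_sliding_window_view matrix window_shape (sliding_window_view matrix window_shape)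

-- ===== LEMMAS AND PROOFS =====

-- slicing commutes with map (slice bounds only inspect the length, which map preserves)
theorem pv_slice_map {α β : Type} (f : α → β) (xs : List α) (a b : Option Int) :
    PySem.List.slice (xs.map f) a b = (PySem.List.slice xs a b).map f := by
  cases a <;> cases b <;>
    simp [PySem.List.slice, PySem.List.clampIdx, List.map_drop, List.map_take]

-- ===== VERDICT (by name: the statement is the Claim_ definition above) =====
theorem sliding_window_view_spec : Claim_equal_sliding_window_view := by
  intro matrix ws _hdom _hpre
  unfold Spec_sliding_window_view
  unfold sliding_window_view sliding_window_view_alt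
  simp only []
  by_cases hny : (matrix.length : Int) - ws.1 + 1 ≤ 0
  · rw [if_pos hny,
        show PySem.List.pyRange 0 ((matrix.length : Int) - ws.1 + 1) 1 = [] from
          PySem.List.pyRange_one_eq_nil hny,
        List.map_nil]
  rw [if_neg hny]
  apply List.map_congr_left
  intro y _hy
  rw [pv_slice_map]
  apply List.map_congr_left
  intro x hx
  rw [PySem.List.mem_pyRange_one] at hx
  rw [List.map_map]
  apply List.map_congr_left
  intro row _hrow
  simp only [Function.comp_apply]
  rw [PySem.List.pyGetD_map_pyRange_of_nonneg _ _ _ _ hx.1 hx.2]
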